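-- pv_equiv track=rewrite | github.com/hurtado-santiago/introduction-to-programming-using-python | Final Exam/pruebas.py | reverse_dictionary
-- ===== SOURCE A (Python) =====
-- def reverse_dictionary(some_dict):
--     output={}
--
--     values=sorted(some_dict.values())
--     keys=sorted(some_dict.keys())
--
--     for key in keys:
--         for item in some_dict[key]:
--             if item not in output.keys():
--                 output[item.lower()]=[key.lower()]
--             else:
--                 output[item.lower()].append(key.lower())
--                 output[item.lower()]=sorted(output[item.lower()])
--     return(output)
-- ===== SOURCE B (Python) =====
-- def reverse_dictionary(some_dict):
--     pairs = [(item.lower(), key.lower())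
--              for key in sorted(some_dict)
--              for item in some_dict[key]]
--     output = {}
--     for item, key in pairs:
--         output.setdefault(item, []).append(key)
--     return {item: sorted(keys) for item, keys in output.items()}
-- ===== Notes on version B (the rewrite author's own statement) =====
-- stated objective: faster
-- what changed: B flattens the dict into (lowered item, lowered key) pairs, groups them with setdefault/append in one pass and sorts each bucket exactly once at the end, instead of A's per-occurrence membership test plus re-sorting the whole bucket after every append; B also fixes A's overwrite bug (A tests the raw item against the lowered output keys).
-- intended difference: On dicts where some item occurrence (in key-sorted processing order) is not all-lowercase and its lowered form already occurred earlier, A's membership test misses and A returns a bucket holding only the keys seen since the last such overwrite, while B returns the sorted list of all lowered keys of that item, the intended reverse mapping. — e.g. on reverse_dictionary([("b", ["X"]), ("a", ["x"])]): A returns [("x", ["b"])], B returns [("x", ["a", "b"])]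
import Mathlib
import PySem

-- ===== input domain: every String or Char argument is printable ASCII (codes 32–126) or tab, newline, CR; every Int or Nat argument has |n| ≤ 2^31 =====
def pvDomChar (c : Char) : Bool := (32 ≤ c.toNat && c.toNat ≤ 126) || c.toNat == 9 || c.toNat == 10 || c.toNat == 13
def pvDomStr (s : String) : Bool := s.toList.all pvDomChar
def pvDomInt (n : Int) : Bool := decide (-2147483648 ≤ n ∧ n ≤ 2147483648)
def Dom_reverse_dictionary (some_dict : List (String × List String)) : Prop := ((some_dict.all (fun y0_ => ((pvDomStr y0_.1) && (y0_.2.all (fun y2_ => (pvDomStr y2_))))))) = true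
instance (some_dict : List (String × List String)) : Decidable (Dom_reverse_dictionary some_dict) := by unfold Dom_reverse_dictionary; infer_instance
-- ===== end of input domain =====

-- B groups all lowered keys per item in one pass and sorts each bucket once at the end,
-- instead of A's membership-test-and-resort on every single occurrence; B also fixes A's
-- overwrite bug (A tests `item` against the lowered keys of `output`, so a repeated
-- mixed-case item silently overwrites the bucket instead of appending to it).

-- ===== PORT A =====
-- `output[item.lower()].append(...)` followed by `output[...] = sorted(...)` is ported as one
-- insert of the sorted appended list (exact: Python's two statements have that net effect).
def reverse_dictionary (some_dict : List (String × List String)) : List (String × List String) :=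
  let d := PySem.Dict.ofList some_dict
  let _values := PySem.List.sorted d.values (fun v => v) false
  let keys := PySem.List.sorted d.keys (fun k => k) false
  let output : PySem.Dict String (List String) :=
    keys.foldl (fun output key =>
      ((d.get? key).getD []).foldl (fun output item =>
        if ¬ (output.keys.contains item) then
          output.insert (PySem.Str.lower item) [PySem.Str.lower key]
        else
          output.insert (PySem.Str.lower item)
            (PySem.List.sorted (((output.get? (PySem.Str.lower item)).getD []) ++ [PySem.Str.lower key]) (fun x => x) false))
        output)
      PySem.Dict.empty
  output.items

-- ===== PORT B =====
def reverse_dictionary_alt (some_dict : List (String × List String)) : List (String × List String) :=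
  let d := PySem.Dict.ofList some_dict
  let pairs := (PySem.List.sorted d.keys (fun k => k) false).flatMap
    (fun key => ((d.get? key).getD []).map (fun item => (PySem.Str.lower item, PySem.Str.lower key)))
  let output : PySem.Dict String (List String) :=
    pairs.foldl (fun output p => output.modify p.1 [] (fun l => l ++ [p.2])) PySem.Dict.empty
  output.items.map (fun p => (p.1, PySem.List.sorted p.2 (fun x => x) false))

-- ===== PRECONDITION & SPEC =====
-- Pre_ excludes association lists with duplicate keys: the argument stands for a Python dict,
-- which cannot hold them (the tester's inputs, built from Python dicts, always satisfy Pre_).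
def Pre_reverse_dictionary (some_dict : List (String × List String)) : Prop :=
  (some_dict.map Prod.fst).Nodup
instance (some_dict : List (String × List String)) : Decidable (Pre_reverse_dictionary some_dict) := by unfold Pre_reverse_dictionary; infer_instance
def pvWitness_reverse_dictionary : (List (String × List String)) := [("b", ["y"]), ("a", ["x"])]

-- On dicts where some item occurrence (in A's processing order: keys ascending, list order inside
-- a key) is not spelled like any earlier occurrence's lowered form yet its own lowered form did
-- occur earlier, A's membership test misses and A silently overwrites the already collected keys
-- with just the current one, while B returns all lowered keys of the item, sorted — the intended
-- reverse mapping.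
def D_reverse_dictionary (some_dict : List (String × List String)) : Prop :=
  ∃ p2 ∈ some_dict, ∃ i2 ∈ List.range p2.2.length, ∃ p1 ∈ some_dict, ∃ i1 ∈ List.range p1.2.length,
    (p1.1 < p2.1 ∨ (p1.1 = p2.1 ∧ i1 < i2)) ∧
    PySem.Str.lower (p1.2.getD i1 "") = PySem.Str.lower (p2.2.getD i2 "") ∧
    p2.2.getD i2 "" ≠ PySem.Str.lower (p2.2.getD i2 "")
instance (some_dict : List (String × List String)) : Decidable (D_reverse_dictionary some_dict) := by unfold D_reverse_dictionary; infer_instance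

def Spec_reverse_dictionary (some_dict : List (String × List String)) (out : List (String × List String)) : Prop := ¬ D_reverse_dictionary some_dict → out = reverse_dictionary_alt some_dict
instance (some_dict : List (String × List String)) (out : List (String × List String)) : Decidable (Spec_reverse_dictionary some_dict out) := by unfold Spec_reverse_dictionary; infer_instance

def pvDiffWitness_reverse_dictionary : (List (String × List String)) := [("b", ["X"]), ("a", ["x"])]
def pvDiffWitnessOut_reverse_dictionary : (List (String × List String)) × (List (String × List String)) :=
  ([("x", ["b"])], [("x", ["a", "b"])])

-- ===== CLAIM (what is proved, stated in full; the proofs are below) =====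
def Claim_unchanged_reverse_dictionary : Prop := ∀ (some_dict : List (String × List String)), Dom_reverse_dictionary some_dict → Pre_reverse_dictionary some_dict → Spec_reverse_dictionary some_dict (reverse_dictionary some_dict)
def Claim_changed_reverse_dictionary : Prop := Dom_reverse_dictionary (pvDiffWitness_reverse_dictionary) ∧ Pre_reverse_dictionary (pvDiffWitness_reverse_dictionary) ∧ D_reverse_dictionary (pvDiffWitness_reverse_dictionary) ∧ reverse_dictionary (pvDiffWitness_reverse_dictionary) = pvDiffWitnessOut_reverse_dictionary.1 ∧ reverse_dictionary_alt (pvDiffWitness_reverse_dictionary) = pvDiffWitnessOut_reverse_dictionary.2 ∧ pvDiffWitnessOut_reverse_dictionary.1 ≠ pvDiffWitnessOut_reverse_dictionary.2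
def Claim_exact_reverse_dictionary : Prop := ∀ (some_dict : List (String × List String)), Dom_reverse_dictionary some_dict → Pre_reverse_dictionary some_dict → D_reverse_dictionary some_dict → reverse_dictionary some_dict ≠ reverse_dictionary_alt some_dict

-- ===== LEMMAS AND PROOFS =====

-- abbreviation for the identity sort both programs use
def pvSrt (l : List String) : List String := PySem.List.sorted l (fun x => x) false

-- one step of A's inner loop, over an (item, key) pair
def pvStepA (out : PySem.Dict String (List String)) (p : String × String) : PySem.Dict String (List String) :=
  if ¬ (out.keys.contains p.1) then
    out.insert (PySem.Str.lower p.1) [PySem.Str.lower p.2]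
  else
    out.insert (PySem.Str.lower p.1) (pvSrt (((out.get? (PySem.Str.lower p.1)).getD []) ++ [PySem.Str.lower p.2]))

-- one step of B's loop, over a raw (item, key) pair
def pvStepB (out : PySem.Dict String (List String)) (p : String × String) : PySem.Dict String (List String) :=
  out.modify (PySem.Str.lower p.1) [] (fun l => l ++ [PySem.Str.lower p.2])

-- the flattened (item, key) occurrence list both loops traverse
def pvPairs (sd : List (String × List String)) : List (String × String) :=
  (PySem.List.sorted (PySem.Dict.ofList sd).keys (fun k => k) false).flatMap
    (fun k => (((PySem.Dict.ofList sd).get? k).getD []).map (fun it => (it, k)))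

-- "no bug fires": whenever the lowered item was seen, the item itself (spelled that way) was seen
def pvOk : List String → List String → Prop
  | _, [] => True
  | seen, it :: rest => (PySem.Str.lower it ∈ seen → it ∈ seen) ∧ pvOk (PySem.Str.lower it :: seen) rest

lemma pv_lowerChar_idem (c : Char) :
    PySem.Chars.lowerChar (PySem.Chars.lowerChar c) = PySem.Chars.lowerChar c := by
  by_cases h : ('A' ≤ c ∧ c ≤ 'Z')
  · have t1 : 65 ≤ c.toNat := by
      have := h.1; rw [Char.le_def, UInt32.le_iff_toNat_le] at this; exact this
    have t2 : c.toNat ≤ 90 := by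
      have := h.2; rw [Char.le_def, UInt32.le_iff_toNat_le] at this; exact this
    have hv : (c.toNat + 32).isValidChar := Or.inl (by omega)
    have ht : (Char.ofNat (c.toNat + 32)).toNat = c.toNat + 32 := by
      rw [Char.toNat_ofNat, if_pos hv]
    have hin : PySem.Chars.lowerChar c = Char.ofNat (c.toNat + 32) := by
      unfold PySem.Chars.lowerChar PySem.Chars.isupper
      rw [if_pos (by simp [h.1, h.2])]
    rw [hin]
    unfold PySem.Chars.lowerChar PySem.Chars.isupper
    rw [if_neg]
    intro hcon
    simp only [Bool.and_eq_true, decide_eq_true_eq] at hcon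
    have h90 : (Char.ofNat (c.toNat + 32)).toNat ≤ 90 := by
      have := hcon.2; rw [Char.le_def, UInt32.le_iff_toNat_le] at this; exact this
    omega
  · have hin : PySem.Chars.lowerChar c = c := by
      unfold PySem.Chars.lowerChar PySem.Chars.isupper
      rw [if_neg (by simpa [Bool.and_eq_true, decide_eq_true_eq] using h)]
    rw [hin, hin]

lemma pv_lower_idem (s : String) :
    PySem.Str.lower (PySem.Str.lower s) = PySem.Str.lower s := by
  apply String.toList_inj.mp
  simp only [PySem.Str.toList_lower, PySem.Chars.lower, List.map_map]
  exact List.map_congr_left (fun c _ => pv_lowerChar_idem c)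

lemma pvSrt_singleton (x : String) : pvSrt [x] = [x] := by
  apply PySem.List.sorted_eq_self_of_pairwise
  simp

lemma pvSrt_srt_append (l : List String) (x : String) :
    pvSrt (pvSrt l ++ [x]) = pvSrt (l ++ [x]) := by
  apply PySem.List.sorted_eq_sorted_of_perm _ _ _ (fun a b h => h)
  exact (PySem.List.sorted_perm l _ _).append_right [x]

-- A's nested loop, flattened to a single fold over (item, key) pairs
lemma pv_A_flat (d : PySem.Dict String (List String)) (ks : List String)
    (acc : PySem.Dict String (List String)) :
    ks.foldl (fun output key =>
      ((d.get? key).getD []).foldl (fun output item =>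
        if ¬ (output.keys.contains item) then
          output.insert (PySem.Str.lower item) [PySem.Str.lower key]
        else
          output.insert (PySem.Str.lower item)
            (PySem.List.sorted (((output.get? (PySem.Str.lower item)).getD []) ++ [PySem.Str.lower key]) (fun x => x) false))
        output) acc
    = (ks.flatMap (fun k => ((d.get? k).getD []).map (fun it => (it, k)))).foldl pvStepA acc := by
  induction ks generalizing acc with
  | nil => rfl
  | cons k ks ih =>
    simp only [List.foldl_cons, List.flatMap_cons, List.foldl_append, List.foldl_map, ih]
    congr 1

-- B's single loop over lowered pairs, as a fold over the same raw pairs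
lemma pv_B_flat (d : PySem.Dict String (List String)) (ks : List String)
    (acc : PySem.Dict String (List String)) :
    (ks.flatMap (fun key => ((d.get? key).getD []).map
        (fun item => (PySem.Str.lower item, PySem.Str.lower key)))).foldl
      (fun output p => output.modify p.1 [] (fun l => l ++ [p.2])) acc
    = (ks.flatMap (fun k => ((d.get? k).getD []).map (fun it => (it, k)))).foldl pvStepB acc := by
  have h : (ks.flatMap (fun key => ((d.get? key).getD []).map
      (fun item => (PySem.Str.lower item, PySem.Str.lower key))))
      = (ks.flatMap (fun k => ((d.get? k).getD []).map (fun it => (it, k)))).map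
          (fun p => (PySem.Str.lower p.1, PySem.Str.lower p.2)) := by
    simp [List.map_flatMap, List.map_map, Function.comp_def]
  rw [h, List.foldl_map]
  congr 1

lemma pv_items_ofList (sd : List (String × List String))
    (h : (sd.map Prod.fst).Nodup) : (PySem.Dict.ofList sd).items = sd := by
  unfold PySem.Dict.ofList PySem.Dict.update
  rw [PySem.Dict.items_foldl_insert_fresh sd Prod.fst Prod.snd PySem.Dict.empty
      (fun a _ => PySem.Dict.contains_empty _) h]
  simp [PySem.Dict.empty]

lemma pv_keys_ofList (sd : List (String × List String))
    (h : (sd.map Prod.fst).Nodup) : (PySem.Dict.ofList sd).keys = sd.map Prod.fst := by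
  simp only [PySem.Dict.keys, pv_items_ofList sd h]

lemma pv_get_ofList (sd : List (String × List String)) (h : (sd.map Prod.fst).Nodup)
    {p : String × List String} (hp : p ∈ sd) :
    (PySem.Dict.ofList sd).get? p.1 = some p.2 := by
  apply PySem.Dict.get?_of_mem_items
  · rw [pv_items_ofList sd h]; exact hp
  · rw [pv_keys_ofList sd h]; exact h

-- the flattened item sequence both loops traverse, and a positional split of it
lemma pv_flat_split (f : String → List String) :
    ∀ (ks : List String) (j : Nat), j < (ks.flatMap f).length →
    ∃ ks1 k ks2 i, ks = ks1 ++ k :: ks2 ∧ i < (f k).length ∧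
      (ks.flatMap f).getD j "" = (f k).getD i "" ∧
      (ks.flatMap f).take j = ks1.flatMap f ++ (f k).take i := by
  intro ks
  induction ks with
  | nil => intro j hj; simp at hj
  | cons k t ih =>
    intro j hj
    by_cases hjk : j < (f k).length
    · refine ⟨[], k, t, j, rfl, hjk, ?_, ?_⟩
      · simp only [List.flatMap_cons]
        rw [List.getD_append _ _ _ _ hjk]
      · simp only [List.flatMap_cons, List.flatMap_nil, List.nil_append]
        rw [List.take_append, Nat.sub_eq_zero_of_le (le_of_lt hjk)]
        simp
    · rw [not_lt] at hjk
      have hj' : j - (f k).length < (t.flatMap f).length := by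
        simp only [List.flatMap_cons, List.length_append] at hj
        omega
      obtain ⟨ks1, k', ks2, i, hsplit, hi, hgd, htk⟩ := ih (j - (f k).length) hj'
      refine ⟨k :: ks1, k', ks2, i, by rw [hsplit]; rfl, hi, ?_, ?_⟩
      · simp only [List.flatMap_cons]
        rw [List.getD_append_right _ _ _ _ hjk, hgd]
      · simp only [List.flatMap_cons]
        rw [List.take_append, List.take_of_length_le hjk, htk,
            List.append_assoc]

lemma pv_mem_f_iff (l : List String) (x : String) :
    x ∈ l ↔ ∃ i, i < l.length ∧ l.getD i "" = x := by
  rw [List.mem_iff_getElem]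
  constructor
  · rintro ⟨n, hn, rfl⟩; exact ⟨n, hn, List.getD_eq_getElem _ _ hn⟩
  · rintro ⟨n, hn, rfl⟩; exact ⟨n, hn, (List.getD_eq_getElem _ _ hn).symm⟩

-- a bug position in the flattened occurrence sequence yields the stated input condition D_
lemma pv_bug_to_D (sd : List (String × List String)) (hnd : (sd.map Prod.fst).Nodup)
    (f : String → List String) (ks : List String)
    (hfval : ∀ p ∈ sd, f p.1 = p.2)
    (hperm : ks.Perm (sd.map Prod.fst))
    (hple : ks.Pairwise (fun a b => a ≤ b))
    (j : Nat) (hj : j < (ks.flatMap f).length)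
    (hin : PySem.Str.lower ((ks.flatMap f).getD j "")
      ∈ ((ks.flatMap f).take j).map PySem.Str.lower)
    (hnotin : (ks.flatMap f).getD j ""
      ∉ ((ks.flatMap f).take j).map PySem.Str.lower) :
    D_reverse_dictionary sd := by
  obtain ⟨ks1, k, ks2, i, hsplit, hi, hgd, htk⟩ := pv_flat_split f ks j hj
  rw [hgd] at hin hnotin
  rw [htk] at hin hnotin
  have hksmem : ∀ k', k' ∈ ks ↔ k' ∈ sd.map Prod.fst := fun k' => hperm.mem_iff
  have hksnd : ks.Nodup := hperm.nodup_iff.mpr hnd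
  have hplt : ks.Pairwise (fun a b => a < b) :=
    (hple.and hksnd).imp (fun h => lt_of_le_of_ne h.1 h.2)
  have hbucket : ∀ k' ∈ ks, (k', f k') ∈ sd := by
    intro k' hk'
    obtain ⟨p, hp, hp1⟩ := List.mem_map.1 ((hksmem k').1 hk')
    have hfv : f k' = p.2 := by rw [← hp1]; exact hfval p hp
    rw [hfv, ← hp1]
    exact hp
  have hkks : k ∈ ks := by rw [hsplit]; simp
  have hk1lt : ∀ k1 ∈ ks1, k1 < k := by
    intro k1 h1
    have := (List.pairwise_append.1 (hsplit ▸ hplt)).2.2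
    exact this k1 h1 k (by simp)
  -- the flagged occurrence is not fixed by lower (else it would be its own earlier lowered copy)
  have hne : (f k).getD i "" ≠ PySem.Str.lower ((f k).getD i "") := by
    intro he
    exact hnotin (he ▸ hin)
  refine ⟨(k, f k), hbucket k hkks, i, List.mem_range.mpr hi, ?_⟩
  -- some earlier occurrence has the same lowered form
  obtain ⟨e, he, helow⟩ := List.mem_map.1 hin
  rcases List.mem_append.1 he with he1 | he2
  · obtain ⟨k1, hk1, hek1⟩ := List.mem_flatMap.1 he1
    obtain ⟨i1, hi1, hgd1⟩ := (pv_mem_f_iff (f k1) e).1 hek1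
    have hk1ks : k1 ∈ ks := by rw [hsplit]; exact List.mem_append.2 (Or.inl hk1)
    refine ⟨(k1, f k1), hbucket k1 hk1ks, i1, List.mem_range.mpr hi1,
      Or.inl (hk1lt k1 hk1), ?_, hne⟩
    rw [hgd1]; exact helow
  · obtain ⟨i1, hi1, hgd1⟩ := (pv_mem_f_iff ((f k).take i) e).1 he2
    have hil : i1 < i := by
      rw [List.length_take] at hi1
      omega
    have hi1f : i1 < (f k).length := lt_trans hil hi
    refine ⟨(k, f k), hbucket k hkks, i1, List.mem_range.mpr hi1f, Or.inr ⟨rfl, hil⟩, ?_, hne⟩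
    rw [← hgd1, List.getD_eq_getElem _ _ hi1, List.getElem_take,
        ← List.getD_eq_getElem _ _ hi1f] at helow
    exact helow

-- translate ¬D_ (index form) to the structural predicate pvOk
lemma pv_ok_of_forall (l : List String) :
    ∀ seen : List String,
      (∀ j, j < l.length →
        PySem.Str.lower (l.getD j "") ∈ (l.take j).map PySem.Str.lower ++ seen →
        l.getD j "" ∈ (l.take j).map PySem.Str.lower ++ seen) →
      pvOk seen l := by
  induction l with
  | nil => intro seen _; trivial
  | cons it rest ih =>
    intro seen h
    constructor
    · have := h 0 (by simp)
      simpa using this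
    · apply ih
      intro j hj hm
      have h2 := h (j + 1) (by simpa using hj)
      simp only [List.getD_cons_succ, List.take_succ_cons, List.map_cons, List.cons_append,
        List.mem_cons, List.mem_append] at h2
      simp only [List.mem_cons, List.mem_append] at hm ⊢
      tauto

-- the main loop invariant: outside the bug region, A's dict is B's dict with every bucket sorted
lemma pv_loop (ps : List (String × String)) :
    ∀ (dA dB : PySem.Dict String (List String)) (seen : List String),
      dA.items = dB.items.map (fun q => (q.1, pvSrt q.2)) →
      dB.keys.Nodup →
      (∀ s : String, s ∈ dB.keys ↔ s ∈ seen) →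
      (∀ s ∈ seen, PySem.Str.lower s = s) →
      pvOk seen (ps.map Prod.fst) →
      (ps.foldl pvStepA dA).items = (ps.foldl pvStepB dB).items.map (fun q => (q.1, pvSrt q.2)) := by
  induction ps with
  | nil => intro dA dB seen hit _ _ _ _; simpa using hit
  | cons p rest ih =>
    intro dA dB seen hit hnd hkeys hseen hok
    obtain ⟨hok1, hok2⟩ := hok
    have hkeysAB : dA.keys = dB.keys := by
      simp only [PySem.Dict.keys, hit, List.map_map, Function.comp_def]
    simp only [List.foldl_cons]
    by_cases hmem : p.1 ∈ dB.keys
    · -- item already present (hence all-lowercase): A appends and re-sorts, B appends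
      have hs1 : p.1 ∈ seen := (hkeys p.1).1 hmem
      have hl : PySem.Str.lower p.1 = p.1 := hseen _ hs1
      have hcB : dB.contains p.1 = true := (PySem.Dict.contains_iff_mem_keys dB p.1).2 hmem
      have hcA : dA.contains p.1 = true := by
        apply (PySem.Dict.contains_iff_mem_keys dA p.1).2
        rw [hkeysAB]; exact hmem
      obtain ⟨q, hq, hq1⟩ := List.mem_map.1 hmem
      obtain ⟨l, rfl⟩ : ∃ l, q = (p.1, l) := ⟨q.2, by cases q; simp at hq1; simp [hq1]⟩
      have hgetB : dB.get? p.1 = some l := PySem.Dict.get?_of_mem_items dB hq hnd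
      have hndA : dA.keys.Nodup := by rw [hkeysAB]; exact hnd
      have hgetA : dA.get? p.1 = some (pvSrt l) := by
        apply PySem.Dict.get?_of_mem_items dA _ hndA
        rw [hit]
        exact List.mem_map.2 ⟨(p.1, l), hq, rfl⟩
      have hcontA : dA.keys.contains p.1 = true := by
        rw [hkeysAB]; exact List.contains_iff_mem.2 hmem
      have hstepA : pvStepA dA p
          = dA.insert p.1 (pvSrt (l ++ [PySem.Str.lower p.2])) := by
        unfold pvStepA
        rw [if_neg (not_not_intro hcontA), hl, hgetA]
        simp only [Option.getD_some]
        rw [pvSrt_srt_append]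
      have hstepB : pvStepB dB p = dB.insert p.1 (l ++ [PySem.Str.lower p.2]) := by
        unfold pvStepB PySem.Dict.modify
        rw [hl, PySem.Dict.getD_eq_get?_getD, hgetB]
        rfl
      rw [hstepA, hstepB]
      refine ih _ _ (PySem.Str.lower p.1 :: seen) ?_ ?_ ?_ ?_ hok2
      · -- items relation after the two inserts at an existing key
        rw [PySem.Dict.items_insert_of_contains _ _ hcA,
            PySem.Dict.items_insert_of_contains _ _ hcB, hit]
        simp only [List.map_map]
        apply List.map_congr_left
        intro q _
        by_cases hqq : q.1 = p.1 <;> simp [hqq]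
      · rw [PySem.Dict.keys_insert_of_contains _ _ hcB]; exact hnd
      · intro s
        rw [PySem.Dict.keys_insert_of_contains _ _ hcB, hl]
        constructor
        · intro h; exact List.mem_cons_of_mem _ ((hkeys s).1 h)
        · intro h
          rcases List.mem_cons.1 h with h | h
          · subst h; exact hmem
          · exact (hkeys s).2 h
      · intro s hs
        rw [hl] at hs
        rcases List.mem_cons.1 hs with h | h
        · subst h; exact hl
        · exact hseen _ h
    · -- fresh (lowered) item: both sides append a new singleton bucket
      have hns : p.1 ∉ seen := fun h => hmem ((hkeys p.1).2 h)
      have hlns : PySem.Str.lower p.1 ∉ seen := fun h => hns (hok1 h)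
      have hlnk : PySem.Str.lower p.1 ∉ dB.keys := fun h => hlns ((hkeys _).1 h)
      have hcB : dB.contains (PySem.Str.lower p.1) = false := by
        rw [← Bool.not_eq_true]
        exact fun h => hlnk ((PySem.Dict.contains_iff_mem_keys dB _).1 h)
      have hcA : dA.contains (PySem.Str.lower p.1) = false := by
        rw [← Bool.not_eq_true]
        intro h
        have := (PySem.Dict.contains_iff_mem_keys dA _).1 h
        rw [hkeysAB] at this
        exact hlnk this
      have hcontA : dA.keys.contains p.1 = false := by
        rw [← Bool.not_eq_true]
        intro h
        have := List.contains_iff_mem.1 h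
        rw [hkeysAB] at this
        exact hmem this
      have hstepA : pvStepA dA p
          = dA.insert (PySem.Str.lower p.1) [PySem.Str.lower p.2] := by
        unfold pvStepA
        rw [if_pos (by rw [hcontA]; simp)]
      have hstepB : pvStepB dB p
          = dB.insert (PySem.Str.lower p.1) [PySem.Str.lower p.2] := by
        unfold pvStepB PySem.Dict.modify
        rw [PySem.Dict.getD_of_not_contains _ _ hcB]
        rfl
      rw [hstepA, hstepB]
      refine ih _ _ (PySem.Str.lower p.1 :: seen) ?_ ?_ ?_ ?_ hok2
      · rw [PySem.Dict.items_insert_of_not_contains _ _ hcA,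
            PySem.Dict.items_insert_of_not_contains _ _ hcB, hit]
        simp [pvSrt_singleton]
      · rw [PySem.Dict.keys_insert_of_not_contains _ _ hcB]
        exact List.Nodup.append hnd (List.nodup_singleton _) (List.disjoint_singleton.mpr hlnk)
      · intro s
        rw [PySem.Dict.keys_insert_of_not_contains _ _ hcB]
        simp only [List.mem_append, List.mem_cons]
        rw [hkeys s]
        tauto
      · intro s hs
        rcases List.mem_cons.1 hs with h | h
        · subst h; exact pv_lower_idem _
        · exact hseen _ h

lemma pv_A_items (sd : List (String × List String)) :
    reverse_dictionary sd = ((pvPairs sd).foldl pvStepA PySem.Dict.empty).items :=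
  congrArg PySem.Dict.items
    (pv_A_flat (PySem.Dict.ofList sd)
      (PySem.List.sorted (PySem.Dict.ofList sd).keys (fun k => k) false) PySem.Dict.empty)

lemma pv_B_items (sd : List (String × List String)) :
    reverse_dictionary_alt sd
      = ((pvPairs sd).foldl pvStepB PySem.Dict.empty).items.map
          (fun (q : String × List String) => (q.1, pvSrt q.2)) :=
  congrArg (fun dd : PySem.Dict String (List String) =>
      dd.items.map (fun (q : String × List String) => (q.1, pvSrt q.2)))
    (pv_B_flat (PySem.Dict.ofList sd)
      (PySem.List.sorted (PySem.Dict.ofList sd).keys (fun k => k) false) PySem.Dict.empty)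

-- A = B outside the bug region
lemma pv_main (sd : List (String × List String)) (hpre : (sd.map Prod.fst).Nodup)
    (hnd : ¬ D_reverse_dictionary sd) :
    reverse_dictionary sd = reverse_dictionary_alt sd := by
  rw [pv_A_items, pv_B_items]
  refine pv_loop (pvPairs sd) PySem.Dict.empty PySem.Dict.empty [] ?_ ?_ ?_ ?_ ?_
  · simp [PySem.Dict.empty]
  · simp [PySem.Dict.empty, PySem.Dict.keys]
  · intro s; simp [PySem.Dict.empty, PySem.Dict.keys]
  · intro s hs; cases hs
  · -- pvOk [] of the occurrence sequence, from ¬D_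
    have hocc : (pvPairs sd).map Prod.fst
        = (PySem.List.sorted (PySem.Dict.ofList sd).keys (fun k => k) false).flatMap
            (fun k => ((PySem.Dict.ofList sd).get? k).getD []) := by
      simp [pvPairs, List.map_flatMap, List.map_map, Function.comp_def]
    apply pv_ok_of_forall
    intro j hj hm
    by_contra hnm
    refine hnd (pv_bug_to_D sd hpre
      (fun k => ((PySem.Dict.ofList sd).get? k).getD [])
      (PySem.List.sorted (PySem.Dict.ofList sd).keys (fun k => k) false)
      (fun p hp => by show ((PySem.Dict.ofList sd).get? p.1).getD [] = p.2; rw [pv_get_ofList sd hpre hp]; rfl)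
      (by rw [← pv_keys_ofList sd hpre]; exact PySem.List.sorted_perm _ _ _)
      (PySem.List.sorted_pairwise _ _)
      j (by rw [← hocc]; exact hj) ?_ ?_)
    · rw [← hocc]; simpa using hm
    · rw [← hocc]; simpa using hnm

-- ---- tightness: inside D_ the two ports always differ ----

-- A's step always inserts at the lowered item; the inserted value depends on the branch
def pvValA (out : PySem.Dict String (List String)) (p : String × String) : List String :=
  if ¬ (out.keys.contains p.1) then [PySem.Str.lower p.2]
  else pvSrt (((out.get? (PySem.Str.lower p.1)).getD []) ++ [PySem.Str.lower p.2])

lemma pvStepA_eq_insert (out : PySem.Dict String (List String)) (p : String × String) :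
    pvStepA out p = out.insert (PySem.Str.lower p.1) (pvValA out p) := by
  unfold pvStepA pvValA
  split_ifs <;> rfl

lemma pvStepA_fresh (d : PySem.Dict String (List String)) (p : String × String)
    (h : d.keys.contains p.1 = false) :
    pvStepA d p = d.insert (PySem.Str.lower p.1) [PySem.Str.lower p.2] := by
  unfold pvStepA
  rw [if_pos (show ¬ (d.keys.contains p.1 = true) from fun hc => by
    rw [h] at hc; exact Bool.false_ne_true hc)]

lemma pvStepA_fun_eq :
    pvStepA = fun (d : PySem.Dict String (List String)) (x : String × String) =>
      d.insert ((fun p : String × String => PySem.Str.lower p.1) x) (pvValA d x) :=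
  funext fun d => funext fun p => pvStepA_eq_insert d p

lemma pv_A_keys (ps : List (String × String)) (d : PySem.Dict String (List String)) :
    (ps.foldl pvStepA d).keys
      = PySem.Set.update d.keys (ps.map (fun p => PySem.Str.lower p.1)) := by
  rw [pvStepA_fun_eq]
  exact PySem.Dict.keys_foldl_insert_key ps _ pvValA d

lemma pv_A_nodup (ps : List (String × String)) (d : PySem.Dict String (List String))
    (h : d.keys.Nodup) : (ps.foldl pvStepA d).keys.Nodup := by
  rw [pvStepA_fun_eq]
  exact PySem.Dict.nodup_keys_foldl_insert_key ps _ pvValA d h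

-- A's bucket for K grows by at most one per K-occurrence
lemma pv_A_len_le (K : String) :
    ∀ (ps : List (String × String)) (d : PySem.Dict String (List String)) (n : Nat),
      (d.getD K []).length ≤ n →
      ((ps.foldl pvStepA d).getD K []).length
        ≤ n + (ps.filter (fun p => PySem.Str.lower p.1 == K)).length := by
  intro ps
  induction ps with
  | nil => intro d n h; simpa using h
  | cons p ps ih =>
    intro d n h
    rw [List.foldl_cons, pvStepA_eq_insert]
    by_cases hK : PySem.Str.lower p.1 = K
    · rw [List.filter_cons_of_pos (by simp [hK])]
      have hv : ((d.insert (PySem.Str.lower p.1) (pvValA d p)).getD K []).length ≤ n + 1 := by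
        rw [hK, PySem.Dict.getD_insert_self]
        unfold pvValA
        split_ifs
        · simp only [pvSrt, PySem.List.length_sorted, List.length_append,
            List.length_singleton, hK, ← PySem.Dict.getD_eq_get?_getD]
          omega
        · simp only [List.length_singleton]
          omega
      have := ih _ (n + 1) hv
      simp only [List.length_cons] at *
      omega
    · rw [List.filter_cons_of_neg (by simp [hK])]
      apply ih
      rwa [PySem.Dict.getD_insert_of_ne _ _ _ (Ne.symm hK)]

-- B's bucket for K is exactly the list of lowered keys of all K-occurrences
lemma pv_B_len (ps : List (String × String)) (K : String) :
    ((ps.foldl pvStepB PySem.Dict.empty).getD K []).length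
      = (ps.filter (fun p => PySem.Str.lower p.1 == K)).length := by
  have h1 : ps.foldl pvStepB PySem.Dict.empty
      = (ps.map (fun p => (PySem.Str.lower p.1, PySem.Str.lower p.2))).foldl
          (fun d p => d.modify p.1 [] (fun l => l ++ [p.2])) PySem.Dict.empty := by
    rw [List.foldl_map]
    rfl
  rw [h1, PySem.Dict.getD_foldl_modify_append, List.filter_map]
  simp [Function.comp_def]

-- inside D_, some bucket of A is strictly shorter than B's
lemma pv_len_lt (sd : List (String × List String)) (hnd : (sd.map Prod.fst).Nodup)
    (f : String → List String) (ks : List String)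
    (hfval : ∀ p ∈ sd, f p.1 = p.2)
    (hperm : ks.Perm (sd.map Prod.fst))
    (hple : ks.Pairwise (fun a b => a ≤ b))
    (hD : D_reverse_dictionary sd) :
    ∃ K : String,
      (((ks.flatMap (fun k => (f k).map (fun it => (it, k)))).foldl
          pvStepA PySem.Dict.empty).getD K []).length
      < (((ks.flatMap (fun k => (f k).map (fun it => (it, k)))).foldl
          pvStepB PySem.Dict.empty).getD K []).length := by
  obtain ⟨p2, hp2, i2, hi2r, p1, hp1, i1, hi1r, hb, hlow, hne⟩ := hD
  rw [List.mem_range] at hi2r hi1r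
  set g : String → List (String × String) := fun k => (f k).map (fun it => (it, k)) with hg
  have hksnd : ks.Nodup := hperm.nodup_iff.mpr hnd
  have hplt : ks.Pairwise (fun a b => a < b) :=
    (hple.and hksnd).imp (fun h => lt_of_le_of_ne h.1 h.2)
  have hk2ks : p2.1 ∈ ks := hperm.mem_iff.2 (List.mem_map.2 ⟨p2, hp2, rfl⟩)
  obtain ⟨ks1, ks2, hsplit⟩ := List.append_of_mem hk2ks
  have hk1lt : ∀ k1 ∈ ks1, k1 < p2.1 := by
    intro k1 h1
    exact (List.pairwise_append.1 (hsplit ▸ hplt)).2.2 k1 h1 p2.1 (by simp)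
  have hk2gt : ∀ k' ∈ ks2, p2.1 < k' := by
    have := (List.pairwise_append.1 (hsplit ▸ hplt)).2.1
    exact fun k' h' => (List.pairwise_cons.1 this).1 k' h'
  have hfk2 : f p2.1 = p2.2 := hfval p2 hp2
  have hgi2 : i2 < (g p2.1).length := by simp only [hg, List.length_map, hfk2]; exact hi2r
  -- the flagged occurrence and the decomposition of the pair sequence around it
  have hitem2 : (g p2.1)[i2] = (p2.2.getD i2 "", p2.1) := by
    simp only [hg, List.getElem_map, hfk2]
    rw [List.getD_eq_getElem _ _ hi2r]
  have hdec : g p2.1 = (g p2.1).take i2 ++ (g p2.1)[i2] :: (g p2.1).drop (i2 + 1) := by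
    conv_lhs => rw [← List.take_append_drop i2 (g p2.1)]
    rw [List.getElem_cons_drop]
  have hpairs : ks.flatMap g
      = (ks1.flatMap g ++ (g p2.1).take i2)
        ++ (p2.2.getD i2 "", p2.1)
          :: ((g p2.1).drop (i2 + 1) ++ ks2.flatMap g) := by
    rw [hsplit, List.flatMap_append, List.flatMap_cons]
    conv_lhs => rw [hdec]
    rw [hitem2]
    simp [List.append_assoc]
  set K := PySem.Str.lower (p2.2.getD i2 "") with hK
  set pre := ks1.flatMap g ++ (g p2.1).take i2 with hpre
  set post := (g p2.1).drop (i2 + 1) ++ ks2.flatMap g with hpost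
  -- the earlier same-lowered occurrence lies in the prefix
  have hmem1 : (p1.2.getD i1 "", p1.1) ∈ pre := by
    have hk1ks : p1.1 ∈ ks := hperm.mem_iff.2 (List.mem_map.2 ⟨p1, hp1, rfl⟩)
    rcases hb with hlt | ⟨heq, hilt⟩
    · have hk1ks1 : p1.1 ∈ ks1 := by
        rw [hsplit] at hk1ks
        rcases List.mem_append.1 hk1ks with h | h
        · exact h
        · rcases List.mem_cons.1 h with h | h
          · exact absurd (h ▸ hlt) (lt_irrefl _)
          · exact absurd hlt (not_lt_of_gt (hk2gt _ h))
      apply List.mem_append.2 (Or.inl _)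
      apply List.mem_flatMap.2 ⟨p1.1, hk1ks1, ?_⟩
      simp only [hg, List.mem_map]
      refine ⟨p1.2.getD i1 "", ?_, rfl⟩
      rw [hfval p1 hp1, List.getD_eq_getElem _ _ hi1r]
      exact List.getElem_mem _
    · -- same key, earlier position in the same bucket
      have hq : p1.2 = p2.2 := by rw [← hfval p1 hp1, heq, hfk2]
      apply List.mem_append.2 (Or.inr _)
      have hti : (g p2.1).take i2 = (p2.2.take i2).map (fun it => (it, p2.1)) := by
        simp only [hg, hfk2]
        exact (List.map_take).symm
      rw [hti]
      apply List.mem_map.2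
      refine ⟨p2.2.getD i1 "", ?_, by rw [← hq, ← heq]⟩
      have hi1len : i1 < p2.2.length := by rw [← hq]; exact hi1r
      have hl1 : i1 < (p2.2.take i2).length := by
        rw [List.length_take]
        omega
      have hmem := List.getElem_mem hl1
      rw [List.getElem_take] at hmem
      rwa [List.getD_eq_getElem _ _ hi1len]
  -- A misses and overwrites at the flagged occurrence
  have hs0keys : ∀ x, x ∈ (List.foldl pvStepA PySem.Dict.empty pre).keys
      → x ∈ pre.map (fun p => PySem.Str.lower p.1) := by
    intro x hx
    rw [pv_A_keys] at hx
    have := (PySem.Set.mem_update _ _ _).1 hx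
    simpa [PySem.Dict.keys_empty] using this
  have hnotin0 : p2.2.getD i2 "" ∉ (List.foldl pvStepA PySem.Dict.empty pre).keys := by
    intro hx
    obtain ⟨y, _, hy⟩ := List.mem_map.1 (hs0keys _ hx)
    apply hne
    rw [hK, ← hy, pv_lower_idem]
  have hcont0 : (List.foldl pvStepA PySem.Dict.empty pre).keys.contains (p2.2.getD i2 "")
      = false := by
    rw [← Bool.not_eq_true]
    exact fun h => hnotin0 (List.contains_iff_mem.1 h)
  have hstep : pvStepA (List.foldl pvStepA PySem.Dict.empty pre) (p2.2.getD i2 "", p2.1)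
      = (List.foldl pvStepA PySem.Dict.empty pre).insert K [PySem.Str.lower p2.1] := by
    rw [pvStepA_fresh _ _ hcont0, hK]
  have hlen1 : (((List.foldl pvStepA PySem.Dict.empty pre).insert K
      [PySem.Str.lower p2.1]).getD K []).length ≤ 1 := by
    rw [PySem.Dict.getD_insert_self]
    simp
  have hlenA := pv_A_len_le K post _ 1 hlen1
  -- counting the K-occurrences
  have hpredbug : (fun p : String × String => PySem.Str.lower p.1 == K) (p2.2.getD i2 "", p2.1)
      = true := by simp [hK]
  have hpred1 : (fun p : String × String => PySem.Str.lower p.1 == K) (p1.2.getD i1 "", p1.1)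
      = true := by
    simp only [beq_iff_eq]
    rw [hlow, hK]
  have hcountpre : 0 < (pre.filter (fun p => PySem.Str.lower p.1 == K)).length :=
    List.length_pos_of_mem (List.mem_filter.2 ⟨hmem1, hpred1⟩)
  refine ⟨K, ?_⟩
  rw [hpairs, pv_B_len, List.filter_append,
      show List.filter (fun p : String × String => PySem.Str.lower p.1 == K)
          ((p2.2.getD i2 "", p2.1) :: post)
        = (p2.2.getD i2 "", p2.1) :: List.filter (fun p => PySem.Str.lower p.1 == K) post
        from List.filter_cons_of_pos hpredbug,
      List.foldl_append, List.foldl_cons, hstep]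
  simp only [List.length_append, List.length_cons]
  omega

-- A ≠ B on all of D_: the strictly shorter bucket survives the final comparison
lemma pv_tight (sd : List (String × List String)) (hpre : (sd.map Prod.fst).Nodup)
    (hD : D_reverse_dictionary sd) :
    reverse_dictionary sd ≠ reverse_dictionary_alt sd := by
  intro hEq
  rw [pv_A_items, pv_B_items] at hEq
  obtain ⟨K, hlt⟩ := pv_len_lt sd hpre
    (fun k => ((PySem.Dict.ofList sd).get? k).getD [])
    (PySem.List.sorted (PySem.Dict.ofList sd).keys (fun k => k) false)
    (fun p hp => by show ((PySem.Dict.ofList sd).get? p.1).getD [] = p.2; rw [pv_get_ofList sd hpre hp]; rfl)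
    (by rw [← pv_keys_ofList sd hpre]; exact PySem.List.sorted_perm _ _ _)
    (PySem.List.sorted_pairwise _ _) hD
  have hpv : pvPairs sd
      = (PySem.List.sorted (PySem.Dict.ofList sd).keys (fun k => k) false).flatMap
          (fun k => (((PySem.Dict.ofList sd).get? k).getD []).map (fun it => (it, k))) := rfl
  rw [← hpv] at hlt
  -- if the returned lists were equal, the two buckets at K would have equal length
  have hBsome : ∃ v, (List.foldl pvStepB PySem.Dict.empty (pvPairs sd)).get? K = some v := by
    cases hB : (List.foldl pvStepB PySem.Dict.empty (pvPairs sd)).get? K with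
    | none =>
      exfalso
      rw [PySem.Dict.getD_eq_get?_getD (List.foldl pvStepB PySem.Dict.empty (pvPairs sd)) K [],
          hB] at hlt
      simp at hlt
    | some v => exact ⟨v, rfl⟩
  obtain ⟨v, hv⟩ := hBsome
  have hvmem : (K, v) ∈ (List.foldl pvStepB PySem.Dict.empty (pvPairs sd)).items :=
    PySem.Dict.mem_items_of_get?_eq_some _ hv
  have hAmem : (K, pvSrt v) ∈ (List.foldl pvStepA PySem.Dict.empty (pvPairs sd)).items := by
    rw [hEq]
    exact List.mem_map.2 ⟨(K, v), hvmem, rfl⟩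
  have hAnodup : (List.foldl pvStepA PySem.Dict.empty (pvPairs sd)).keys.Nodup := by
    apply pv_A_nodup
    rw [PySem.Dict.keys_empty]
    exact List.nodup_nil
  have hgA : (List.foldl pvStepA PySem.Dict.empty (pvPairs sd)).get? K = some (pvSrt v) :=
    PySem.Dict.get?_of_mem_items _ hAmem hAnodup
  rw [PySem.Dict.getD_eq_get?_getD, PySem.Dict.getD_eq_get?_getD, hv, hgA] at hlt
  simp only [Option.getD_some, pvSrt, PySem.List.length_sorted] at hlt
  exact lt_irrefl _ hlt

-- evaluating the ports at the witness (String `<` is not kernel-reducible, so the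
-- sorted-key calls are rewritten by the order lemmas first, then everything decides)
lemma pv_w_keys : (PySem.Dict.ofList pvDiffWitness_reverse_dictionary).keys = ["b", "a"] := by
  decide

lemma pv_w_lt : ("a" : String) < "b" := String.lt_iff_toList_lt.mpr (by decide)

lemma pv_w_sorted : PySem.List.sorted ["b", "a"] (fun k : String => k) false = ["a", "b"] :=
  PySem.List.sorted_id_eq_of_perm_of_pairwise _ _ (List.Perm.swap "b" "a" [])
    (by simp; decide)

lemma pv_w_pairs : pvPairs pvDiffWitness_reverse_dictionary = [("x", "a"), ("X", "b")] := by
  unfold pvPairs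
  rw [pv_w_keys, pv_w_sorted]
  decide

lemma pv_w_D : D_reverse_dictionary pvDiffWitness_reverse_dictionary := by
  unfold D_reverse_dictionary pvDiffWitness_reverse_dictionary
  exact ⟨("b", ["X"]), by simp, 0, by decide, ("a", ["x"]), by simp, 0, by decide,
    Or.inl pv_w_lt, by decide, by decide⟩

-- ===== VERDICT (by name: the statement is the Claim_ definition above) =====
theorem reverse_dictionary_spec : Claim_unchanged_reverse_dictionary := by
  intro sd _hDom hpre hnd
  exact pv_main sd hpre hnd

theorem reverse_dictionary_changed : Claim_changed_reverse_dictionary := by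
  unfold Claim_changed_reverse_dictionary
  refine ⟨by decide, by decide, pv_w_D, ?_, ?_, by decide⟩
  · rw [pv_A_items, pv_w_pairs]
    decide
  · rw [pv_B_items, pv_w_pairs]
    rw [show (List.foldl pvStepB PySem.Dict.empty [("x", "a"), ("X", "b")]).items
        = [("x", ["a", "b"])] from by decide]
    simp only [List.map_cons, List.map_nil]
    rw [show pvSrt ["a", "b"] = ["a", "b"] from
      PySem.List.sorted_eq_self_of_pairwise _ _ (by simp; decide)]
    decide

theorem reverse_dictionary_tight : Claim_exact_reverse_dictionary := by
  intro sd _hDom hpre hD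
  exact pv_tight sd hpre hD
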